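-- pv_equiv track=rewrite | github.com/fisop/fork | tests/xargs-test.py | generate_output
-- ===== SOURCE A (Python) =====
-- from math import ceil
--
-- MAX_ARGS = 4
--
-- def generate_output(amount_of_arguments):
--     lines = []
--
--     packages = ceil(amount_of_arguments / MAX_ARGS)
--     arg_id = 0
--
--     for id in range(packages):
--         pkg_args = min(MAX_ARGS, amount_of_arguments - MAX_ARGS * id)
--         for i in range(1, pkg_args + 1):
--             lines.append(f'arg[{i}]: arg{arg_id}')
--             arg_id += 1
--
--     return set(lines)
-- ===== SOURCE B (Python) =====
-- MAX_ARGS = 4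
--
-- def generate_output(amount_of_arguments):
--     return {f'arg[{j % MAX_ARGS + 1}]: arg{j}' for j in range(amount_of_arguments)}
-- ===== Notes on version B (the rewrite author's own statement) =====
-- stated objective: simpler
-- what changed: Replaces the ceil/packages computation and the nested package/inner loops with a single set comprehension over range(n), reconstructing the 1..4 cycling index as j % MAX_ARGS + 1.
import Mathlib
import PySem

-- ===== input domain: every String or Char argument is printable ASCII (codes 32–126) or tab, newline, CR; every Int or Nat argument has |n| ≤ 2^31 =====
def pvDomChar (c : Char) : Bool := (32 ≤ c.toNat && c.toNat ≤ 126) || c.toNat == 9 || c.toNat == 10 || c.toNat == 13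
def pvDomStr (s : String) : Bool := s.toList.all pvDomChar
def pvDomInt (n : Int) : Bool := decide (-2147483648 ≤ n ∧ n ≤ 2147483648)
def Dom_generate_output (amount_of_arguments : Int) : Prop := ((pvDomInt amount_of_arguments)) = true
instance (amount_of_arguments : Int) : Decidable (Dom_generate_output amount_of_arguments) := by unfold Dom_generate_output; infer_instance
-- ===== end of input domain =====

-- B replaces A's ceil/packages computation and nested loops by one set comprehension
-- over range(n) with a modular index; equivalence of the return values is proved below.

-- ===== PORT A =====
-- ceil(amount / 4): Python computes ceil on the float amount/4, exact for |amount| ≤ 2^31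
-- (inside Dom); ported as the integer ceiling -((-amount) // 4).
def generate_output (amount_of_arguments : Int) : List String :=
  let packages : Int := -(PySem.Int.floordiv (-amount_of_arguments) 4)
  let st : List String × Int :=
    (PySem.List.pyRange 0 packages 1).foldl
      (fun (st : List String × Int) id =>
        let pkg_args : Int := min 4 (amount_of_arguments - 4 * id)
        (PySem.List.pyRange 1 (pkg_args + 1) 1).foldl
          (fun (st2 : List String × Int) i =>
            (st2.1 ++ ["arg[" ++ PySem.Int.toStr i ++ "]: arg" ++ PySem.Int.toStr st2.2],
             st2.2 + 1))
          st)
      ([], 0)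
  PySem.Set.ofList st.1

-- ===== PORT B =====
def generate_output_alt (amount_of_arguments : Int) : List String :=
  PySem.Set.ofList
    ((PySem.List.pyRange 0 amount_of_arguments 1).map
      (fun j => "arg[" ++ PySem.Int.toStr (PySem.Int.mod j 4 + 1) ++ "]: arg" ++ PySem.Int.toStr j))

-- ===== PRECONDITION & SPEC =====
def Spec_generate_output (amount_of_arguments : Int) (out : List String) : Prop := out = generate_output_alt amount_of_arguments
instance (amount_of_arguments : Int) (out : List String) : Decidable (Spec_generate_output amount_of_arguments out) := by unfold Spec_generate_output; infer_instance

-- ===== CLAIM (what is proved, stated in full; the proofs are below) =====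
def Claim_equal_generate_output : Prop := ∀ (amount_of_arguments : Int), Dom_generate_output amount_of_arguments → Spec_generate_output amount_of_arguments (generate_output amount_of_arguments)

-- ===== LEMMAS AND PROOFS =====

/-- The line A formats with intra-package index `i` and global counter `j`. -/
def pvLine (i j : Int) : String :=
  "arg[" ++ PySem.Int.toStr i ++ "]: arg" ++ PySem.Int.toStr j

/-- One step of A's inner loop. -/
def pvInnerF (st2 : List String × Int) (i : Int) : List String × Int :=
  (st2.1 ++ [pvLine i st2.2], st2.2 + 1)

/-- One step of A's outer loop (over package ids), for argument count `n`. -/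
def pvOuterF (n : Int) (st : List String × Int) (id : Int) : List String × Int :=
  (PySem.List.pyRange 1 (min 4 (n - 4 * id) + 1) 1).foldl pvInnerF st

/-- The line keyed only by the global index, as B computes it (on nonnegative `t`). -/
def pvG (t : Nat) : String := pvLine ((t % 4 : Nat) + 1) t

lemma pvInner_eq (m : Nat) (acc : List String) (a : Int) :
    (PySem.List.pyRange 1 ((m : Int) + 1) 1).foldl pvInnerF (acc, a)
      = (acc ++ (List.range m).map (fun (t : Nat) => pvLine ((t : Int) + 1) (a + (t : Int))), a + m) := by
  induction m generalizing acc a with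
  | zero => simp [PySem.List.pyRange_one_eq_nil]
  | succ m ih =>
      have h : (1 : Int) ≤ (m : Int) + 1 := by omega
      have hc : ((m + 1 : Nat) : Int) + 1 = ((m : Int) + 1) + 1 := by push_cast; ring
      rw [hc, PySem.List.pyRange_one_succ_right h, List.foldl_append, ih]
      simp [pvInnerF, List.range_succ, Prod.ext_iff]
      omega

lemma pvFull_eq (n : Int) (q : Nat) (h : 4 * (q : Int) ≤ n) :
    (PySem.List.pyRange 0 (q : Int) 1).foldl (pvOuterF n) ([], 0)
      = ((List.range (4 * q)).map pvG, (4 * q : Int)) := by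
  induction q with
  | zero => simp [PySem.List.pyRange_one_eq_nil]
  | succ q ih =>
      have hq : 4 * (q : Int) ≤ n := by push_cast at h ⊢; omega
      have h0 : (0 : Int) ≤ (q : Int) := by omega
      rw [show ((q + 1 : Nat) : Int) = (q : Int) + 1 by push_cast; ring,
          PySem.List.pyRange_one_succ_right h0, List.foldl_append, ih hq]
      have hmin : min (4 : Int) (n - 4 * (q : Int)) = 4 := by push_cast at h; omega
      show pvOuterF n _ _ = _
      rw [pvOuterF, hmin]
      rw [show ((4 : Int) + 1) = ((4 : Nat) : Int) + 1 by norm_num,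
          pvInner_eq 4 _ (4 * (q : Int))]
      simp only [Prod.mk.injEq]
      constructor
      · rw [show 4 * (q + 1) = 4 * q + 4 by ring, List.range_add, List.map_append]
        congr 1
        simp only [List.range_succ, List.range_zero, List.map_append, List.map_cons,
          List.map_nil, List.nil_append, pvG, List.append_assoc]
        norm_num [pvLine]
      · push_cast; ring


lemma genA_eq (n : Int) :
    generate_output n
      = PySem.Set.ofList
          ((PySem.List.pyRange 0 (-(PySem.Int.floordiv (-n) 4)) 1).foldl (pvOuterF n) ([], 0)).1 :=
  rfl

lemma genB_eq (n : Int) :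
    generate_output_alt n = PySem.Set.ofList ((List.range n.toNat).map pvG) := by
  unfold generate_output_alt
  congr 1
  rw [PySem.List.pyRange_one, List.map_map]
  have hn : (n - 0).toNat = n.toNat := by omega
  rw [hn]
  refine List.map_congr_left (fun k _ => ?_) 
  simp only [Function.comp, zero_add, pvG, pvLine]
  have h4 : (0:Int) < 4 := by norm_num
  rw [PySem.Int.mod_eq_emod_of_pos h4]
  norm_cast

lemma lines_eq (n : Int) :
    ((PySem.List.pyRange 0 (-(PySem.Int.floordiv (-n) 4)) 1).foldl (pvOuterF n) ([], 0)).1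
      = (List.range n.toNat).map pvG := by
  by_cases hn : n ≤ 0
  · have hfd : 0 ≤ PySem.Int.floordiv (-n) 4 := by
      rw [PySem.Int.floordiv_eq_ediv_of_pos (by norm_num : (0:Int) < 4)]
      exact Int.ediv_nonneg (by omega) (by norm_num)
    rw [PySem.List.pyRange_one_eq_nil (by omega)]
    simp [show n.toNat = 0 by omega]
  · replace hn : 0 < n := by omega
    set p : Int := -(PySem.Int.floordiv (-n) 4) with hp
    have hbounds : (p - 1) * 4 < n ∧ n ≤ p * 4 :=
      (PySem.Int.neg_floordiv_neg_eq_iff_of_pos (by norm_num : (0:Int) < 4)).mp hp.symm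
    have hp1 : 1 ≤ p := by nlinarith [hbounds.1, hbounds.2]
    set qn : Nat := (p - 1).toNat with hqn
    set rn : Nat := (n - 4 * (p - 1)).toNat with hrn
    have hq : (p - 1 : Int) = (qn : Int) := by omega
    have hr : (n - 4 * (qn : Int)) = (rn : Int) := by omega
    have hr1 : 1 ≤ rn := by omega
    have hr4 : rn ≤ 4 := by omega
    have hsplit : n.toNat = 4 * qn + rn := by omega
    have h4q : 4 * (qn : Int) ≤ n := by omega
    rw [show p = (p - 1) + 1 by ring, PySem.List.pyRange_one_succ_right (by omega),
        List.foldl_append, hq, pvFull_eq n qn h4q]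
    have hmin : min (4 : Int) (n - 4 * (qn : Int)) = (rn : Int) := by omega
    show (pvOuterF n _ _).1 = _
    rw [pvOuterF, hmin, pvInner_eq rn]
    dsimp only
    rw [hsplit, List.range_add, List.map_append, List.map_map]
    congr 1
    refine List.map_congr_left (fun t ht => ?_)
    have ht4 : t < rn := List.mem_range.mp ht
    simp only [Function.comp, pvG, pvLine]
    have h1 : ((t : Int)) + 1 = (((4 * qn + t) % 4 : Nat) : Int) + 1 := by
      have : (4 * qn + t) % 4 = t := by omega
      rw [this]
    have h2 : 4 * (qn : Int) + (t : Int) = ((4 * qn + t : Nat) : Int) := by push_cast; ring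
    rw [h1, h2]

-- ===== VERDICT (by name: the statement is the Claim_ definition above) =====
theorem generate_output_spec : Claim_equal_generate_output := by
  intro n _
  unfold Spec_generate_output
  rw [genA_eq, genB_eq, lines_eq]
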